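-- pv_equiv track=rewrite | github.com/mrsharp-milken/ib-cs-past-paper-analysis | analysis/pattern_analysis.py | get_min_max_papers
-- ===== SOURCE A (Python) =====
-- def get_min_max_papers(combined_per_paper, key, all_papers):
--     """Return (min_papers, max_papers) - session strings for papers with min/max combined marks (incl. 0)."""
--     paper_marks = {pid: combined_per_paper.get(key, {}).get(pid, 0) for pid in all_papers}
--     if not paper_marks:
--         return "", ""
--     mn_val = min(paper_marks.values())
--     mx_val = max(paper_marks.values())
--     min_papers = "; ".join(session for (session, _), v in paper_marks.items() if v == mn_val)
--     max_papers = "; ".join(session for (session, _), v in paper_marks.items() if v == mx_val)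
--     return min_papers, max_papers
-- ===== SOURCE B (Python) =====
-- def get_min_max_papers(combined_per_paper, key, all_papers):
--     """Group sessions by combined mark once, then look up the min and max groups."""
--     marks = combined_per_paper.get(key, {})
--     grouped = {}
--     for pid in dict.fromkeys(all_papers):
--         grouped.setdefault(marks.get(pid, 0), []).append(pid[0])
--     if not grouped:
--         return "", ""
--     return "; ".join(grouped[min(grouped)]), "; ".join(grouped[max(grouped)])
-- ===== Notes on version B (the rewrite author's own statement) =====
-- stated objective: alternative
-- what changed: B builds one dict grouping session strings by combined mark in a single pass over the deduped papers, then answers with two lookups at the min/max key, instead of A's per-paper marks dict followed by min, max and two equality-filter scans over its items.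
import Mathlib
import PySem

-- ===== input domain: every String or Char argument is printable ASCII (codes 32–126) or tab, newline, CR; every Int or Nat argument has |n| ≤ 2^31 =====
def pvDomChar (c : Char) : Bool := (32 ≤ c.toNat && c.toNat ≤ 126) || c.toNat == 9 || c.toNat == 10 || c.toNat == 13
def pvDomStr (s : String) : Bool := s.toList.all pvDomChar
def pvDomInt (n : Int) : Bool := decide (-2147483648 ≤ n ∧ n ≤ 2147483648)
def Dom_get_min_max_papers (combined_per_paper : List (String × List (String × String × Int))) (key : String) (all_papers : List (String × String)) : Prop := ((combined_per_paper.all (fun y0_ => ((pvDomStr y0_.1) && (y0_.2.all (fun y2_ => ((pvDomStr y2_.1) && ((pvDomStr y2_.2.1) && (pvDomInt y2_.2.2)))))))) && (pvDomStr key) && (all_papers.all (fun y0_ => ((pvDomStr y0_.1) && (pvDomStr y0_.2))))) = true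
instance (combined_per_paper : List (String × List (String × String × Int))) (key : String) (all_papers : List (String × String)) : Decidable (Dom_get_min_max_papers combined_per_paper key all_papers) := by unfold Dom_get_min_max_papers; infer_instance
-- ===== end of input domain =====

-- B groups sessions by mark in one dict pass and looks up the min/max groups,
-- instead of A's dict-of-marks plus min/max plus two equality-filter scans; objective: alternative.

-- shared environment lookup: combined_per_paper.get(key, {}).get(pid, 0)
-- (both Pythons perform this exact default-0 two-level dict lookup)
def pvMark (combined_per_paper : List (String × List (String × String × Int))) (key : String) (pid : String × String) : Int :=
  PySem.Dict.getD
    (PySem.Dict.ofList (((PySem.Dict.getD (PySem.Dict.ofList combined_per_paper) key []).map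
      (fun t => ((t.1, t.2.1), t.2.2)))))
    pid 0

-- ===== PORT A =====
def get_min_max_papers (combined_per_paper : List (String × List (String × String × Int))) (key : String) (all_papers : List (String × String)) : String × String :=
  let paper_marks : PySem.Dict (String × String) Int :=
    all_papers.foldl (fun d pid => d.insert pid (pvMark combined_per_paper key pid)) PySem.Dict.empty
  match paper_marks.values with
  | [] => ("", "")   -- 'if not paper_marks: return "", ""' (a dict is empty iff its values list is)
  | v :: vs =>
    let mn_val := vs.foldl min v      -- min(paper_marks.values())
    let mx_val := vs.foldl max v      -- max(paper_marks.values())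
    let min_papers := PySem.Str.join "; " ((paper_marks.items.filter (fun p => p.2 == mn_val)).map (fun p => p.1.1))
    let max_papers := PySem.Str.join "; " ((paper_marks.items.filter (fun p => p.2 == mx_val)).map (fun p => p.1.1))
    (min_papers, max_papers)

-- ===== PORT B =====
def get_min_max_papers_alt (combined_per_paper : List (String × List (String × String × Int))) (key : String) (all_papers : List (String × String)) : String × String :=
  let grouped : PySem.Dict Int (List String) :=
    (PySem.List.dedup all_papers).foldl
      (fun d pid => d.modify (pvMark combined_per_paper key pid) [] (· ++ [pid.1]))
      PySem.Dict.empty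
  match grouped.keys with
  | [] => ("", "")
  | k :: ks =>
    (PySem.Str.join "; " (grouped.getD (ks.foldl min k) []),
     PySem.Str.join "; " (grouped.getD (ks.foldl max k) []))

-- ===== PRECONDITION & SPEC =====
def Spec_get_min_max_papers (combined_per_paper : List (String × List (String × String × Int))) (key : String) (all_papers : List (String × String)) (out : String × String) : Prop := out = get_min_max_papers_alt combined_per_paper key all_papers
instance (combined_per_paper : List (String × List (String × String × Int))) (key : String) (all_papers : List (String × String)) (out : String × String) : Decidable (Spec_get_min_max_papers combined_per_paper key all_papers out) := by unfold Spec_get_min_max_papers; infer_instance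

-- ===== CLAIM (what is proved, stated in full; the proofs are below) =====
def Claim_equal_get_min_max_papers : Prop := ∀ (combined_per_paper : List (String × List (String × String × Int))) (key : String) (all_papers : List (String × String)), Dom_get_min_max_papers combined_per_paper key all_papers → Spec_get_min_max_papers combined_per_paper key all_papers (get_min_max_papers combined_per_paper key all_papers)

-- ===== LEMMAS AND PROOFS =====

theorem getD_foldl_insert_fun {κ : Type} [BEq κ] [LawfulBEq κ] (l : List κ) (f : κ → Int)
    (d : PySem.Dict κ Int) (k : κ) (d0 : Int) :
    (l.foldl (fun d a => d.insert a (f a)) d).getD k d0 =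
      if k ∈ l then f k else d.getD k d0 := by
  induction l generalizing d with
  | nil => simp
  | cons x t ih =>
    simp only [List.foldl_cons, ih]
    by_cases hx : k = x
    · subst hx
      by_cases ht : k ∈ t <;> simp [ht, PySem.Dict.getD_insert_self]
    · simp [List.mem_cons, hx, PySem.Dict.getD_insert_of_ne d (f x) d0 hx]

theorem foldl_min_eq_of_mem_iff (v k : Int) (vs ks : List Int)
    (h : ∀ x, x ∈ v :: vs ↔ x ∈ k :: ks) :
    vs.foldl min v = ks.foldl min k := by
  have h1 := PySem.List.foldl_min_le vs v
  have h2 := PySem.List.foldl_min_le ks k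
  have m1 : vs.foldl min v ∈ v :: vs := by
    rcases PySem.List.foldl_min_mem vs v with h' | h'
    · simp [h']
    · simp [h']
  have m2 : ks.foldl min k ∈ k :: ks := by
    rcases PySem.List.foldl_min_mem ks k with h' | h'
    · simp [h']
    · simp [h']
  have le1 : ks.foldl min k ≤ vs.foldl min v := by
    rcases List.mem_cons.mp ((h _).mp m1) with h' | h'
    · subst h'; exact h2.1
    · exact h2.2 _ h'
  have le2 : vs.foldl min v ≤ ks.foldl min k := by
    rcases List.mem_cons.mp ((h _).mpr m2) with h' | h'
    · subst h'; exact h1.1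
    · exact h1.2 _ h'
  omega

theorem foldl_max_eq_of_mem_iff (v k : Int) (vs ks : List Int)
    (h : ∀ x, x ∈ v :: vs ↔ x ∈ k :: ks) :
    vs.foldl max v = ks.foldl max k := by
  have h1 := PySem.List.le_foldl_max vs v
  have h2 := PySem.List.le_foldl_max ks k
  have m1 : vs.foldl max v ∈ v :: vs := by
    rcases PySem.List.foldl_max_mem vs v with h' | h'
    · simp [h']
    · simp [h']
  have m2 : ks.foldl max k ∈ k :: ks := by
    rcases PySem.List.foldl_max_mem ks k with h' | h'
    · simp [h']
    · simp [h']
  have le1 : vs.foldl max v ≤ ks.foldl max k := by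
    rcases List.mem_cons.mp ((h _).mp m1) with h' | h'
    · subst h'; exact h2.1
    · exact h2.2 _ h'
  have le2 : ks.foldl max k ≤ vs.foldl max v := by
    rcases List.mem_cons.mp ((h _).mpr m2) with h' | h'
    · subst h'; exact h1.1
    · exact h1.2 _ h'
  omega

-- A's paper_marks dict: items are the deduped papers paired with their marks
theorem paper_marks_items (cpp : List (String × List (String × String × Int))) (key : String)
    (all_papers : List (String × String)) :
    (all_papers.foldl (fun d pid => d.insert pid (pvMark cpp key pid)) PySem.Dict.empty).items
      = (PySem.List.dedup all_papers).map (fun pid => (pid, pvMark cpp key pid)) := by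
  set D := all_papers.foldl (fun d pid => d.insert pid (pvMark cpp key pid)) PySem.Dict.empty with hD
  have hkeys : D.keys = PySem.List.dedup all_papers := by
    rw [hD, PySem.Dict.keys_foldl_insert]
    simp [PySem.Dict.keys_empty, PySem.Set.update, PySem.Set.ofList, PySem.List.dedup_eq_ofList]
  have hnd : D.keys.Nodup := by
    rw [hkeys]; exact PySem.List.nodup_dedup all_papers
  rw [PySem.Dict.items_eq_map_keys D hnd 0, hkeys]
  apply List.map_congr_left
  intro pid hpid
  have hmem : pid ∈ all_papers := (PySem.List.mem_dedup _ _).mp hpid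
  rw [hD, getD_foldl_insert_fun]
  simp [hmem]

-- B's grouped dict: getD v [] is the sessions of deduped papers with mark v
theorem grouped_getD (cpp : List (String × List (String × String × Int))) (key : String)
    (all_papers : List (String × String)) (v : Int) :
    ((PySem.List.dedup all_papers).foldl
      (fun d pid => d.modify (pvMark cpp key pid) [] (· ++ [pid.1])) PySem.Dict.empty).getD v []
    = (((PySem.List.dedup all_papers).filter (fun pid => pvMark cpp key pid == v)).map (·.1)) := by
  have : (PySem.List.dedup all_papers).foldl
      (fun d pid => d.modify (pvMark cpp key pid) [] (· ++ [pid.1])) PySem.Dict.empty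
      = ((PySem.List.dedup all_papers).map (fun pid => (pvMark cpp key pid, pid.1))).foldl
        (fun d p => d.modify p.1 [] (· ++ [p.2])) PySem.Dict.empty := by
    rw [List.foldl_map]
  rw [this, PySem.Dict.getD_foldl_modify_append]
  simp [List.filter_map, List.map_map, Function.comp_def]

theorem grouped_keys (cpp : List (String × List (String × String × Int))) (key : String)
    (all_papers : List (String × String)) :
    ((PySem.List.dedup all_papers).foldl
      (fun d pid => d.modify (pvMark cpp key pid) [] (· ++ [pid.1])) PySem.Dict.empty).keys
    = PySem.List.dedup ((PySem.List.dedup all_papers).map (fun pid => pvMark cpp key pid)) := by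
  rw [PySem.Dict.keys_foldl_modify_key]
  simp [PySem.Dict.keys_empty, PySem.Set.update, PySem.Set.ofList, PySem.List.dedup_eq_ofList]

-- ===== VERDICT (by name: the statement is the Claim_ definition above) =====
theorem get_min_max_papers_spec : Claim_equal_get_min_max_papers := by
  intro cpp key allp _
  unfold Spec_get_min_max_papers
  simp only [get_min_max_papers, get_min_max_papers_alt]
  set m := fun pid => pvMark cpp key pid with hm
  set L := PySem.List.dedup allp with hL
  have hitems := paper_marks_items cpp key allp
  set D := allp.foldl (fun d pid => d.insert pid (pvMark cpp key pid)) PySem.Dict.empty with hD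
  set G := L.foldl (fun d pid => d.modify (pvMark cpp key pid) [] (· ++ [pid.1])) PySem.Dict.empty with hG
  have hgk : G.keys = PySem.List.dedup (L.map m) := by
    rw [hG, hL, hm]; exact grouped_keys cpp key allp
  have hvals : D.values = L.map m := by
    show D.items.map (·.2) = L.map m
    rw [hitems]; simp [List.map_map, Function.comp_def, hm, hL, PySem.List.dedup_eq_ofList]
  have hmemiff : ∀ x : Int, x ∈ D.values ↔ x ∈ G.keys := by
    intro x
    rw [hvals, hgk, PySem.List.mem_dedup]
  have hfilter : ∀ w : Int,
      (D.items.filter (fun p => p.2 == w)).map (fun p => p.1.1) = G.getD w [] := by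
    intro w
    rw [hitems, hG, hL, grouped_getD cpp key allp w]
    simp [List.filter_map, List.map_map, Function.comp_def]
  rcases hv : D.values with _ | ⟨v, vs⟩ <;> rcases hk : G.keys with _ | ⟨k, ks⟩
  · rfl
  · exfalso
    have := (hmemiff k).mpr (by rw [hk]; exact List.mem_cons_self)
    rw [hv] at this; simp at this
  · exfalso
    have := (hmemiff v).mp (by rw [hv]; exact List.mem_cons_self)
    rw [hk] at this; simp at this
  · have hiff : ∀ x, x ∈ v :: vs ↔ x ∈ k :: ks := by
      intro x; rw [← hv, ← hk]; exact hmemiff x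
    have hmn := foldl_min_eq_of_mem_iff v k vs ks hiff
    have hmx := foldl_max_eq_of_mem_iff v k vs ks hiff
    simp only [hmn, hmx, hfilter]
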